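-- pv_equiv track=rewrite | github.com/haesol1013/CP1 | assignments/week05/week5_asgmt_2.py | remover1
-- ===== SOURCE A (Python) =====
-- def remover1(obj: list, target: int) -> list:
--     cnt = 0
--     for i in obj:
--         if i == target:
--             cnt += 1
--     for i in range(cnt):
--         obj.remove(target)
--     return obj
-- ===== SOURCE B (Python) =====
-- def remover1(obj: list, target: int) -> list:
--     w = 0
--     for x in obj:
--         if x != target:
--             obj[w] = x
--             w += 1
--     del obj[w:]
--     return obj
-- ===== Notes on version B (the rewrite author's own statement) =====
-- stated objective: alternative
-- what changed: Replaces A's count pass followed by cnt repeated list.remove scans with a single in-place two-pointer compaction pass plus one tail truncation.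
import Mathlib
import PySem

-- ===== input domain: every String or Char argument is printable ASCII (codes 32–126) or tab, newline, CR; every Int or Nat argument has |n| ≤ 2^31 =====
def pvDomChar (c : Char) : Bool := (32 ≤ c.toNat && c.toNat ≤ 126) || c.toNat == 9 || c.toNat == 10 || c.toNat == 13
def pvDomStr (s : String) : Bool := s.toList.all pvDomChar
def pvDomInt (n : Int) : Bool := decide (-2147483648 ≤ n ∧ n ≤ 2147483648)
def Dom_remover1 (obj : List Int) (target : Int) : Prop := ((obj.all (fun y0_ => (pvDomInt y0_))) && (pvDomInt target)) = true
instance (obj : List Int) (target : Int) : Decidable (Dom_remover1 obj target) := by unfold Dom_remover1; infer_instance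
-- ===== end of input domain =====

-- B replaces A's count-then-repeated-remove with one in-place two-pointer compaction pass (objective: alternative).
-- Both Pythons mutate obj in place and return the same object; the equivalence proved here is about the return value.

-- ===== PORT A =====
-- first occurrence of t removed; Python's list.remove raises when t is absent, but A calls it
-- exactly cnt = (number of occurrences) times, so every call finds t and this total helper is exact there
def pvRemoveFirst (xs : List Int) (t : Int) : List Int :=
  match xs with
  | [] => []
  | x :: r => if x = t then r else x :: pvRemoveFirst r t

-- the second loop: 'for i in range(cnt): obj.remove(target)'
def pvRemoveN : Nat → List Int → Int → List Int
  | 0, xs, _ => xs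
  | n+1, xs, t => pvRemoveN n (pvRemoveFirst xs t) t

def remover1 (obj : List Int) (target : Int) : List Int :=
  -- first loop: count occurrences
  let cnt : Nat := obj.foldl (fun c i => if i = target then c + 1 else c) 0
  pvRemoveN cnt obj target

-- ===== PORT B =====
-- Source B compacts survivors into obj[0:w] and then deletes the tail with 'del obj[w:]';
-- the returned value is exactly the written prefix, modelled as the accumulator below
def remover1_alt (obj : List Int) (target : Int) : List Int :=
  obj.foldl (fun acc x => if x ≠ target then acc ++ [x] else acc) []

-- ===== PRECONDITION & SPEC =====
def Spec_remover1 (obj : List Int) (target : Int) (out : List Int) : Prop := out = remover1_alt obj target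
instance (obj : List Int) (target : Int) (out : List Int) : Decidable (Spec_remover1 obj target out) := by unfold Spec_remover1; infer_instance

-- ===== CLAIM (what is proved, stated in full; the proofs are below) =====
def Claim_equal_remover1 : Prop := ∀ (obj : List Int) (target : Int), Dom_remover1 obj target → Spec_remover1 obj target (remover1 obj target)

-- ===== LEMMAS AND PROOFS =====

theorem pvCount_shift (t : Int) (xs : List Int) (c : Nat) :
    xs.foldl (fun c i => if i = t then c + 1 else c) c
      = c + xs.foldl (fun c i => if i = t then c + 1 else c) 0 := by
  induction xs generalizing c with
  | nil => simp
  | cons x r ih =>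
    simp only [List.foldl_cons]
    rw [ih, ih (if x = t then 0 + 1 else 0)]
    split_ifs <;> omega

theorem pvRemoveN_cons_ne (t x : Int) (n : Nat) (r : List Int) (hx : x ≠ t) :
    pvRemoveN n (x :: r) t = x :: pvRemoveN n r t := by
  induction n generalizing r with
  | zero => rfl
  | succ n ih =>
    simp only [pvRemoveN, pvRemoveFirst, if_neg hx]
    exact ih _

theorem pvRemoveN_count (t : Int) (xs : List Int) :
    pvRemoveN (xs.foldl (fun c i => if i = t then c + 1 else c) 0) xs t
      = xs.filter (fun x => decide (x ≠ t)) := by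
  induction xs with
  | nil => rfl
  | cons x r ih =>
    simp only [List.foldl_cons]
    by_cases hx : x = t
    · subst hx
      rw [if_pos rfl, pvCount_shift, Nat.add_comm]
      simp only [pvRemoveN, pvRemoveFirst, if_true]
      rw [ih]
      simp
    · rw [if_neg hx, pvRemoveN_cons_ne t x _ r hx, ih]
      simp [hx]

theorem pvCompact_filter (t : Int) (xs : List Int) (acc : List Int) :
    xs.foldl (fun acc x => if x ≠ t then acc ++ [x] else acc) acc
      = acc ++ xs.filter (fun x => decide (x ≠ t)) := by
  induction xs generalizing acc with
  | nil => simp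
  | cons x r ih =>
    simp only [List.foldl_cons]
    by_cases hx : x = t
    · rw [if_neg (fun h => h hx), ih, List.filter_cons]
      simp [hx]
    · rw [if_pos hx, ih, List.filter_cons]
      simp [hx]

-- ===== VERDICT (by name: the statement is the Claim_ definition above) =====
theorem remover1_spec : Claim_equal_remover1 := by
  intro obj target _
  unfold Spec_remover1 remover1 remover1_alt
  rw [pvRemoveN_count, pvCompact_filter]
  simp
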